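-- pv_equiv track=rewrite | github.com/foolishzhao/leetcode | python3/0800/_0848_Shifting_Letters/main.py | shiftingLetters2
-- ===== SOURCE A (Python) =====
-- from typing import List
--
-- def shiftingLetters2(s: str, shifts: List[int]) -> str:
--     n, s = len(shifts), list(s)
--
--     shifts[-1] %= 26
--     for i in range(n - 1, 0, -1):
--         shifts[i - 1] += shifts[i]
--         shifts[i - 1] %= 26
--
--     for i in range(n):
--         s[i] = chr((ord(s[i]) - ord('a') + shifts[i]) % 26 + ord('a'))
--     return ''.join(s)
-- ===== SOURCE B (Python) =====
-- from typing import List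
--
-- def shiftingLetters2(s: str, shifts: List[int]) -> str:
--     # Forward single pass: `running` holds the suffix sum of shifts at the
--     # current position; only the return value mirrors A (A also mutates shifts).
--     running = sum(shifts)
--     out = []
--     for i in range(len(shifts)):
--         out.append(chr((ord(s[i]) - ord('a') + running) % 26 + ord('a')))
--         running -= shifts[i]
--     return ''.join(out) + s[len(shifts):]
-- ===== Notes on version B (the rewrite author's own statement) =====
-- stated objective: simpler
-- what changed: B replaces A's backward in-place suffix folding of shifts plus a second rewrite pass over s by one forward pass carrying a single running suffix-sum accumulator (B does not mutate shifts; return values agree).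
import Mathlib
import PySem

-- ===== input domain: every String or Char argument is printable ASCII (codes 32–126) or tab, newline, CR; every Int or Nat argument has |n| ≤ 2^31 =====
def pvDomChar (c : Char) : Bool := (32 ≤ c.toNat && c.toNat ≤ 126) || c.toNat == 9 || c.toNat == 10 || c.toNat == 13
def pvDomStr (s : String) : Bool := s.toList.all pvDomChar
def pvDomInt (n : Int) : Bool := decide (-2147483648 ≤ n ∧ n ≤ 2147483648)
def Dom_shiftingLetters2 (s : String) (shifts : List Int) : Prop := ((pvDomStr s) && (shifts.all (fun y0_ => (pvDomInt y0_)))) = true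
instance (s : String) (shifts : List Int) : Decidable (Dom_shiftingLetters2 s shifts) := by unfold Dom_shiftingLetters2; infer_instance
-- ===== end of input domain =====

-- B replaces A's backward in-place suffix folding of `shifts` by one forward pass with a
-- running suffix-sum accumulator (simpler decomposition, no second array pass).
-- Equivalence is about the RETURN value only: Python A also mutates `shifts` in place, B does not.

-- ===== PORT A =====
-- backward loop: shifts[-1] %= 26; for i in range(n-1,0,-1): shifts[i-1] = (shifts[i-1]+shifts[i]) % 26
-- ported as structural recursion on the list (same updates, suffix-first); [] is the
-- IndexError case of shifts[-1] (excluded by Pre_).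
def pvBwdA : List Int → List Int
  | [] => []
  | [x] => [PySem.Int.mod x 26]
  | x :: y :: t =>
    match pvBwdA (y :: t) with
    | [] => []
    | z :: r => PySem.Int.mod (x + z) 26 :: z :: r

-- chr((ord(c) - ord('a') + k) % 26 + ord('a')) — the same expression in both Pythons, shared
def pvShiftChar (c : Char) (k : Int) : Char :=
  Char.ofNat ((PySem.Int.mod ((c.toNat : Int) - 97 + k) 26 + 97).toNat)

def pvFwdA : List Char → List Int → List Char
  | cs, [] => cs
  | [], _ :: _ => []        -- Python raises IndexError here; excluded by Pre_
  | c :: cs, k :: ks => pvShiftChar c k :: pvFwdA cs ks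

def shiftingLetters2 (s : String) (shifts : List Int) : String :=
  String.ofList (pvFwdA s.toList (pvBwdA shifts))

-- ===== PORT B =====
-- for i in range(len(shifts)): append chr(..s[i]..running..); running -= shifts[i]
def pvFwdB : List Char → List Int → Int → List Char
  | _, [], _ => []
  | [], _ :: _, _ => []     -- s[i] raises IndexError in Python here; excluded by Pre_
  | c :: cs, k :: ks, r => pvShiftChar c r :: pvFwdB cs ks (r - k)

-- ''.join(out) + s[len(shifts):]  (len(shifts) ≥ 0, so the slice is List.drop)
def shiftingLetters2_alt (s : String) (shifts : List Int) : String :=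
  String.ofList (pvFwdB s.toList shifts (shifts.foldl (· + ·) 0)
                 ++ s.toList.drop shifts.length)

-- ===== PRECONDITION & SPEC =====
-- A raises IndexError when shifts is empty (shifts[-1]) or longer than s (s[i]); Pre_ excludes exactly those.
def Pre_shiftingLetters2 (s : String) (shifts : List Int) : Prop :=
  shifts ≠ [] ∧ shifts.length ≤ s.toList.length
instance (s : String) (shifts : List Int) : Decidable (Pre_shiftingLetters2 s shifts) := by
  unfold Pre_shiftingLetters2; infer_instance
def pvWitness_shiftingLetters2 : String × List Int := ("abc", [3, 5, 9])

def Spec_shiftingLetters2 (s : String) (shifts : List Int) (out : String) : Prop := out = shiftingLetters2_alt s shifts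
instance (s : String) (shifts : List Int) (out : String) : Decidable (Spec_shiftingLetters2 s shifts out) := by unfold Spec_shiftingLetters2; infer_instance

-- ===== CLAIM (what is proved, stated in full; the proofs are below) =====
def Claim_equal_shiftingLetters2 : Prop := ∀ (s : String) (shifts : List Int), Dom_shiftingLetters2 s shifts → Pre_shiftingLetters2 s shifts → Spec_shiftingLetters2 s shifts (shiftingLetters2 s shifts)

-- ===== LEMMAS AND PROOFS =====

theorem pvBwdA_eq_sum_cons : ∀ (ks : List Int), ks ≠ [] →
    pvBwdA ks = ks.sum % 26 :: pvBwdA ks.tail := by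
  intro ks
  induction ks with
  | nil => intro h; exact absurd rfl h
  | cons k t ih =>
    intro _
    cases t with
    | nil => simp [pvBwdA]
    | cons y r =>
      have ht : pvBwdA (y :: r) = (y :: r).sum % 26 :: pvBwdA (y :: r).tail :=
        ih (by simp)
      simp only [pvBwdA, ht, List.tail_cons, List.sum_cons,
        PySem.Int.mod_eq_emod_of_pos (by norm_num : (0:Int) < 26)]
      refine congrArg₂ List.cons ?_ rfl
      omega

theorem pvShiftChar_emod (c : Char) (t : Int) :
    pvShiftChar c (t % 26) = pvShiftChar c t := by
  unfold pvShiftChar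
  rw [PySem.Int.mod_eq_emod_of_pos (by norm_num : (0:Int) < 26),
      PySem.Int.mod_eq_emod_of_pos (by norm_num : (0:Int) < 26)]
  congr 1
  omega

theorem pvFwd_agree : ∀ (ks : List Int) (cs : List Char) (r : Int), r = ks.sum →
    pvFwdA cs (pvBwdA ks) = pvFwdB cs ks r ++ cs.drop ks.length := by
  intro ks
  induction ks with
  | nil => intro cs r _; simp [pvBwdA, pvFwdA, pvFwdB]
  | cons k t ih =>
    intro cs r hr
    rw [pvBwdA_eq_sum_cons (k :: t) (by simp)]
    cases cs with
    | nil =>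
      cases h : pvBwdA (k :: t).tail <;> simp [pvFwdA, pvFwdB]
    | cons c cs =>
      subst hr
      simp only [List.tail_cons, pvFwdA, pvFwdB, List.length_cons, List.drop_succ_cons,
        List.cons_append]
      rw [pvShiftChar_emod]
      rw [ih cs ((k :: t).sum - k) (by simp [List.sum_cons])]

theorem sum_foldl_gen (ks : List Int) : ∀ (a : Int), ks.foldl (· + ·) a = a + ks.sum := by
  induction ks with
  | nil => intro a; simp
  | cons k t ih => intro a; simp [List.foldl, ih, List.sum_cons]; ring

theorem sum_foldl (ks : List Int) : ks.foldl (· + ·) 0 = ks.sum := by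
  simpa using sum_foldl_gen ks 0

-- ===== VERDICT (by name: the statement is the Claim_ definition above) =====
theorem shiftingLetters2_spec : Claim_equal_shiftingLetters2 := by
  intro s shifts _ hpre
  unfold Spec_shiftingLetters2 shiftingLetters2 shiftingLetters2_alt
  rw [sum_foldl, pvFwd_agree shifts s.toList shifts.sum rfl]
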